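-- pv_equiv track=rewrite | github.com/someng2/CodingPractice | Python/cut_roll_cake.py | solution
-- ===== SOURCE A (Python) =====
-- from collections import defaultdict
-- from collections import Counter
--
-- def solution(topping):
--     answer = 0
--
--     dic1 = defaultdict(int)
--     dic2 = Counter(topping)
--     for i,x in enumerate(topping):
--         dic1[x] += 1
--         dic2[x] -= 1
--         if dic2[x] == 0:
--             del dic2[x]
--         if len(dic1) == len(dic2):
--             answer += 1
--
--     return answer
-- ===== SOURCE B (Python) =====
-- def solution(topping):
--     n = len(topping)
--     suffix = [0] * (n + 1)
--     seen = set()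
--     for i in range(n - 1, -1, -1):
--         seen.add(topping[i])
--         suffix[i] = len(seen)
--     answer = 0
--     left = set()
--     for i, x in enumerate(topping):
--         left.add(x)
--         if len(left) == suffix[i + 1]:
--             answer += 1
--     return answer
-- ===== Notes on version B (the rewrite author's own statement) =====
-- stated objective: faster
-- what changed: Replaced A's two live dictionaries (a growing defaultdict plus a Counter decremented and pruned at every step) by a two-phase pass: precompute a suffix distinct-count array with one right-to-left set sweep, then one left-to-right sweep with a single growing set comparing its size against the precomputed count.
import Mathlib
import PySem

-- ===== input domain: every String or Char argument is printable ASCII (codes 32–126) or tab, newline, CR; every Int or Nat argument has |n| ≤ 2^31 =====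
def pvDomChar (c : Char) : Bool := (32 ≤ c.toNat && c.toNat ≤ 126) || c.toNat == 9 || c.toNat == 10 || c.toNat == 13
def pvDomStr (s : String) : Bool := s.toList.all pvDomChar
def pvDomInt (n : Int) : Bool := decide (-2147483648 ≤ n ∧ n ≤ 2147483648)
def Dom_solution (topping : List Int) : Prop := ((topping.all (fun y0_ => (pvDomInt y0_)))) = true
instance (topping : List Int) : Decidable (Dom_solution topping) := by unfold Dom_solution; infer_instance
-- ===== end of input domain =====

-- B replaces A's two live dictionaries by a precomputed suffix distinct-count array plus one
-- growing set; same O(n) algorithm class, measurably faster by a constant factor (lighter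
-- per-step work: set adds instead of two dict updates and a delete).

-- ===== PORT A =====
-- literal transliteration of A: a defaultdict(int) grown over the prefix, a Counter of the
-- whole list decremented (and pruned at zero) over the suffix; answer += 1 when sizes agree.
def solution (topping : List Int) : Int :=
  (((PySem.List.enumerate topping).foldl
    (fun (s : Int × PySem.Dict Int Int × PySem.Dict Int Int) ix =>
      let x := ix.2
      let dic1 := s.2.1.modify x 0 (· + 1)
      let dic2 := s.2.2.modify x 0 (· - 1)
      let dic2 := if dic2.getD x 0 == 0 then dic2.erase x else dic2
      ((if dic1.size == dic2.size then s.1 + 1 else s.1), dic1, dic2))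
    (0, PySem.Dict.empty, PySem.Dict.counter topping)) : Int × _).1

-- ===== PORT B =====
-- right-to-left sweep of Source B building suffix[i] = #distinct toppings in topping[i:]
-- (the Python index loop writing suffix back-to-front is the foldr; suffix[n] stays 0)
def suffixCounts (topping : List Int) : List Int :=
  (topping.foldr
    (fun x (st : PySem.Set Int × List Int) =>
      let s := st.1.add x
      (s, (s.length : Int) :: st.2))
    ((PySem.Set.empty : PySem.Set Int), [(0 : Int)])).2

-- left-to-right sweep of Source B; the loop index i is nonnegative throughout and suffix has
-- length n+1, so the Nat-indexed List.getD is exact for Python's suffix[i + 1]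
def solution_alt (topping : List Int) : Int :=
  let suffix := suffixCounts topping
  ((topping.foldl
    (fun (st : Int × PySem.Set Int × Nat) x =>
      let left := st.2.1.add x
      let i := st.2.2
      ((if (left.length : Int) = suffix.getD (i + 1) 0 then st.1 + 1 else st.1), left, i + 1))
    (0, (PySem.Set.empty : PySem.Set Int), 0)) : Int × _).1

-- ===== PRECONDITION & SPEC =====
def Spec_solution (topping : List Int) (out : Int) : Prop := out = solution_alt topping
instance (topping : List Int) (out : Int) : Decidable (Spec_solution topping out) := by unfold Spec_solution; infer_instance

-- ===== CLAIM (what is proved, stated in full; the proofs are below) =====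
def Claim_equal_solution : Prop := ∀ (topping : List Int), Dom_solution topping → Spec_solution topping (solution topping)

-- ===== LEMMAS AND PROOFS =====

-- reference loop both ports are reduced to: walk the list with the set of toppings seen so
-- far, counting positions where its size equals the distinct count of the remaining suffix
def refLoop : List Int → PySem.Set Int → Int → Int
  | [], _, ans => ans
  | x :: r, seen, ans =>
      refLoop r (seen.add x)
        (if (seen.add x).length = (PySem.Set.ofList r).length then ans + 1 else ans)

theorem length_eq_of_nodup_mem {l₁ l₂ : List Int} (h₁ : l₁.Nodup) (h₂ : l₂.Nodup)
    (h : ∀ x, x ∈ l₁ ↔ x ∈ l₂) : l₁.length = l₂.length :=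
  ((List.perm_ext_iff_of_nodup h₁ h₂).mpr h).length_eq

-- A's dic2 invariant: keys are distinct, each stored value is the multiplicity in the
-- remaining suffix r, and no key is stored with multiplicity 0
def DicInv (d : PySem.Dict Int Int) (r : List Int) : Prop :=
  d.keys.Nodup ∧ (∀ v, d.getD v 0 = (r.count v : Int)) ∧
    (∀ v, d.contains v = true → r.count v ≠ 0)

theorem dict_size_keys (d : PySem.Dict Int Int) : d.size = d.keys.length := by
  simp [PySem.Dict.size, PySem.Dict.keys]

theorem size_eq_of_contains {d : PySem.Dict Int Int} {s : List Int}
    (hnd : d.keys.Nodup) (hs : s.Nodup) (h : ∀ v, d.contains v = true ↔ v ∈ s) :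
    d.size = s.length := by
  rw [dict_size_keys]
  apply length_eq_of_nodup_mem hnd hs
  intro v
  rw [← PySem.Dict.contains_iff_mem_keys]
  exact h v

theorem size_of_inv {d : PySem.Dict Int Int} {r : List Int} (h : DicInv d r) :
    d.size = (PySem.Set.ofList r).length := by
  obtain ⟨hnd, hg, hc⟩ := h
  apply size_eq_of_contains hnd (PySem.Set.nodup_ofList r)
  intro v
  rw [PySem.Set.mem_ofList]
  constructor
  · intro hv
    exact List.count_pos_iff.mp (Nat.pos_of_ne_zero (hc v hv))
  · intro hv
    by_contra hnc
    have hfalse : d.contains v = false := by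
      cases hcv : d.contains v
      · rfl
      · exact absurd hcv hnc
    have h0 := PySem.Dict.getD_of_not_contains d (0 : Int) hfalse
    have hgv := hg v
    rw [h0] at hgv
    have hpos := List.count_pos_iff.mpr hv
    omega

theorem find?_filter_ne (l : List (Int × Int)) (k v : Int) (h : v ≠ k) :
    List.find? (fun p => p.1 == v) (l.filter (fun p => !(p.1 == k))) =
      List.find? (fun p => p.1 == v) l := by
  induction l with
  | nil => rfl
  | cons a t ih =>
    simp only [List.filter_cons]
    by_cases hk : a.1 = k
    · have hv : (a.1 == v) = false := by simp; omega
      rw [List.find?_cons_of_neg (by simp [hv]), if_neg (by simp [hk])]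
      exact ih
    · rw [if_pos (by simp [hk])]
      by_cases hv : a.1 = v
      · rw [List.find?_cons_of_pos (by simp [hv]), List.find?_cons_of_pos (by simp [hv])]
      · rw [List.find?_cons_of_neg (by simp [hv]), List.find?_cons_of_neg (by simp [hv])]
        exact ih

theorem contains_erase_self (d : PySem.Dict Int Int) (k : Int) :
    (d.erase k).contains k = false := by
  simp [PySem.Dict.erase, PySem.Dict.contains, List.any_filter]

theorem contains_erase_ne (d : PySem.Dict Int Int) {k v : Int} (h : v ≠ k) :
    (d.erase k).contains v = d.contains v := by
  simp only [PySem.Dict.erase, PySem.Dict.contains, List.any_filter]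
  apply PySem.List.any_congr_mem
  intro p _
  by_cases hv : p.1 = v
  · simp [hv, h]
  · simp [hv]

theorem getD_erase_self (d : PySem.Dict Int Int) (k : Int) :
    (d.erase k).getD k 0 = 0 := by
  have hnone : (d.erase k).get? k = none := by
    simp only [PySem.Dict.erase, PySem.Dict.get?]
    rw [List.find?_eq_none.mpr]
    · rfl
    · intro p hp
      have := List.of_mem_filter hp
      simpa using this
  simp [PySem.Dict.getD, hnone]

theorem getD_erase_ne (d : PySem.Dict Int Int) {k v : Int} (h : v ≠ k) :
    (d.erase k).getD v 0 = d.getD v 0 := by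
  simp only [PySem.Dict.getD, PySem.Dict.get?, PySem.Dict.erase]
  rw [find?_filter_ne _ _ _ h]

theorem nodup_keys_erase {d : PySem.Dict Int Int} (k : Int) (hnd : d.keys.Nodup) :
    (d.erase k).keys.Nodup := by
  have hkeys : (d.erase k).keys = d.keys.filter (fun a => !(a == k)) := by
    simp only [PySem.Dict.keys, PySem.Dict.erase]
    rw [List.filter_map]
    rfl
  rw [hkeys]
  exact List.Nodup.filter _ hnd

theorem inv_step {d : PySem.Dict Int Int} {x : Int} {r : List Int} (h : DicInv d (x :: r)) :
    DicInv (if (d.modify x 0 (· - 1)).getD x 0 == 0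
             then (d.modify x 0 (· - 1)).erase x else d.modify x 0 (· - 1)) r := by
  obtain ⟨hnd, hg, hc⟩ := h
  have hgx : (d.modify x 0 (· - 1)).getD x 0 = (r.count x : Int) := by
    rw [PySem.Dict.getD_modify_self, hg x, List.count_cons_self]
    push_cast; ring
  have hgv : ∀ v, v ≠ x → (d.modify x 0 (· - 1)).getD v 0 = (r.count v : Int) := by
    intro v hv
    rw [PySem.Dict.getD_modify, if_neg hv, hg v, List.count_cons_of_ne (by omega)]
  have hnd' : (d.modify x 0 (· - 1)).keys.Nodup := by
    rw [PySem.Dict.keys_modify]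
    exact PySem.Dict.nodup_keys_insert d _ _ hnd
  have hcont : ∀ v, (d.modify x 0 (· - 1)).contains v = (v == x || d.contains v) :=
    fun v => PySem.Dict.contains_modify d x v 0 _
  by_cases hz : r.count x = 0
  · rw [if_pos (by rw [hgx]; simp [hz])]
    refine ⟨nodup_keys_erase x hnd', fun v => ?_, fun v hcv => ?_⟩
    · by_cases hv : v = x
      · subst hv; rw [getD_erase_self]; simp [hz]
      · rw [getD_erase_ne _ hv, hgv v hv]
    · by_cases hv : v = x
      · subst hv; rw [contains_erase_self] at hcv; cases hcv
      · rw [contains_erase_ne _ hv, hcont v] at hcv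
        rcases Bool.or_eq_true_iff.mp hcv with h' | h'
        · exact absurd (by simpa using h') hv
        · have hcx := hc v h'
          rwa [List.count_cons_of_ne (by omega)] at hcx
  · rw [if_neg (by rw [hgx]; simpa using (by exact_mod_cast hz : ((r.count x : Nat) : Int) ≠ 0))]
    refine ⟨hnd', fun v => ?_, fun v hcv => ?_⟩
    · by_cases hv : v = x
      · subst hv; exact hgx
      · exact hgv v hv
    · rw [hcont v] at hcv
      by_cases hv : v = x
      · subst hv; exact hz
      · rcases Bool.or_eq_true_iff.mp hcv with h' | h'
        · exact absurd (by simpa using h') hv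
        · have hcx := hc v h'
          rwa [List.count_cons_of_ne (by omega)] at hcx

theorem A_loop (r : List Int) : ∀ (k : Int) (ans : Int) (d1 d2 : PySem.Dict Int Int)
    (seen : PySem.Set Int), d1.keys.Nodup → seen.Nodup →
    (∀ v, d1.contains v = true ↔ v ∈ seen) → DicInv d2 r →
    (((PySem.List.enumerate r k).foldl
      (fun (s : Int × PySem.Dict Int Int × PySem.Dict Int Int) ix =>
        let x := ix.2
        let dic1 := s.2.1.modify x 0 (· + 1)
        let dic2 := s.2.2.modify x 0 (· - 1)
        let dic2 := if dic2.getD x 0 == 0 then dic2.erase x else dic2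
        ((if dic1.size == dic2.size then s.1 + 1 else s.1), dic1, dic2))
      (ans, d1, d2)) : Int × _).1 = refLoop r seen ans := by
  induction r with
  | nil => intro k ans d1 d2 seen _ _ _ _; rfl
  | cons x t ih =>
    intro k ans d1 d2 seen hnd1 hseen hcs hinv
    have henum : PySem.List.enumerate (x :: t) k = (k, x) :: PySem.List.enumerate t (k + 1) := by
      simp [PySem.List.enumerate]
    rw [henum, List.foldl_cons]
    show (((PySem.List.enumerate t (k + 1)).foldl
      (fun (s : Int × PySem.Dict Int Int × PySem.Dict Int Int) ix =>
        let x := ix.2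
        let dic1 := s.2.1.modify x 0 (· + 1)
        let dic2 := s.2.2.modify x 0 (· - 1)
        let dic2 := if dic2.getD x 0 == 0 then dic2.erase x else dic2
        ((if dic1.size == dic2.size then s.1 + 1 else s.1), dic1, dic2))
      ((if (d1.modify x 0 (· + 1)).size ==
              (if (d2.modify x 0 (· - 1)).getD x 0 == 0
                 then (d2.modify x 0 (· - 1)).erase x else d2.modify x 0 (· - 1)).size
            then ans + 1 else ans),
           d1.modify x 0 (· + 1),
           (if (d2.modify x 0 (· - 1)).getD x 0 == 0
              then (d2.modify x 0 (· - 1)).erase x else d2.modify x 0 (· - 1)))) : Int × _).1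
      = refLoop (x :: t) seen ans
    have hnd1' : (d1.modify x 0 (· + 1)).keys.Nodup := by
      rw [PySem.Dict.keys_modify]
      exact PySem.Dict.nodup_keys_insert d1 _ _ hnd1
    have hcs' : ∀ v, (d1.modify x 0 (· + 1)).contains v = true ↔ v ∈ seen.add x := by
      intro v
      rw [PySem.Dict.contains_modify, PySem.Set.mem_add]
      constructor
      · intro hv
        rcases Bool.or_eq_true_iff.mp hv with hv | hv
        · exact Or.inr (by simpa using hv)
        · exact Or.inl ((hcs v).mp hv)
      · intro hv
        rcases hv with hv | hv
        · exact Bool.or_eq_true_iff.mpr (Or.inr ((hcs v).mpr hv))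
        · exact Bool.or_eq_true_iff.mpr (Or.inl (by simpa using hv))
    have hsize1 : (d1.modify x 0 (· + 1)).size = (seen.add x).length :=
      size_eq_of_contains hnd1' (PySem.Set.nodup_add seen x hseen) hcs'
    have hinv' := inv_step (x := x) (r := t) hinv
    have hsize2 : (if (d2.modify x 0 (· - 1)).getD x 0 == 0
        then (d2.modify x 0 (· - 1)).erase x else d2.modify x 0 (· - 1)).size
        = (PySem.Set.ofList t).length := size_of_inv hinv'
    rw [ih (k + 1) _ _ _ (seen.add x) hnd1' (PySem.Set.nodup_add seen x hseen) hcs' hinv']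
    show refLoop t (seen.add x) _ = refLoop (x :: t) seen ans
    rw [refLoop]
    congr 1
    rw [hsize1, hsize2]
    by_cases hcond : (seen.add x).length = (PySem.Set.ofList t).length
    · rw [if_pos (by simpa using hcond), if_pos hcond]
    · rw [if_neg (by simpa using hcond), if_neg hcond]

-- suffixCounts xs: the running set is distinct-complete for xs and entry i is the distinct
-- count of xs.drop i, for every i ≤ xs.length
theorem suffix_inv (xs : List Int) :
    (xs.foldr (fun x (st : PySem.Set Int × List Int) =>
        let s := st.1.add x
        (s, (s.length : Int) :: st.2))
      ((PySem.Set.empty : PySem.Set Int), [(0 : Int)])).1.Nodup ∧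
    (∀ v, v ∈ (xs.foldr (fun x (st : PySem.Set Int × List Int) =>
        let s := st.1.add x
        (s, (s.length : Int) :: st.2))
      ((PySem.Set.empty : PySem.Set Int), [(0 : Int)])).1 ↔ v ∈ xs) ∧
    ∀ i ≤ xs.length,
      (suffixCounts xs).getD i 0 = ((PySem.Set.ofList (xs.drop i)).length : Int) := by
  induction xs with
  | nil =>
    refine ⟨List.nodup_nil, by simp [PySem.Set.empty], ?_⟩
    intro i hi
    have : i = 0 := by simpa using hi
    subst this
    rfl
  | cons x t ih =>
    obtain ⟨hnd, hmem, hidx⟩ := ih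
    have hcons : suffixCounts (x :: t) =
        (((t.foldr (fun x (st : PySem.Set Int × List Int) =>
            let s := st.1.add x
            (s, (s.length : Int) :: st.2))
          ((PySem.Set.empty : PySem.Set Int), [(0 : Int)])).1.add x).length : Int)
          :: suffixCounts t := rfl
    have hfst : (((x :: t).foldr (fun x (st : PySem.Set Int × List Int) =>
        let s := st.1.add x
        (s, (s.length : Int) :: st.2))
      ((PySem.Set.empty : PySem.Set Int), [(0 : Int)])).1)
        = (t.foldr (fun x (st : PySem.Set Int × List Int) =>
            let s := st.1.add x
            (s, (s.length : Int) :: st.2))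
          ((PySem.Set.empty : PySem.Set Int), [(0 : Int)])).1.add x := rfl
    refine ⟨?_, ?_, ?_⟩
    · rw [hfst]; exact PySem.Set.nodup_add _ x hnd
    · intro v
      rw [hfst, PySem.Set.mem_add]
      rw [hmem v]
      constructor
      · rintro (hv | hv)
        · exact List.mem_cons_of_mem _ hv
        · exact hv ▸ List.mem_cons_self
      · intro hv
        rcases List.mem_cons.mp hv with hv | hv
        · exact Or.inr hv
        · exact Or.inl hv
    · intro i hi
      match i with
      | 0 =>
        rw [hcons, List.getD_cons_zero, List.drop_zero]
        congr 1
        apply length_eq_of_nodup_mem (PySem.Set.nodup_add _ x hnd)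
          (PySem.Set.nodup_ofList (x :: t))
        intro v
        rw [PySem.Set.mem_add, PySem.Set.mem_ofList, hmem v]
        constructor
        · rintro (hv | hv)
          · exact List.mem_cons_of_mem _ hv
          · exact hv ▸ List.mem_cons_self
        · intro hv
          rcases List.mem_cons.mp hv with hv | hv
          · exact Or.inr hv
          · exact Or.inl hv
      | j + 1 =>
        rw [hcons, List.getD_cons_succ, List.drop_succ_cons]
        exact hidx j (by simpa using hi)

theorem B_loop (xs : List Int) : ∀ (r p : List Int) (seen : PySem.Set Int) (ans : Int),
    xs = p ++ r →
    ((r.foldl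
      (fun (st : Int × PySem.Set Int × Nat) x =>
        let left := st.2.1.add x
        let i := st.2.2
        ((if (left.length : Int) = (suffixCounts xs).getD (i + 1) 0 then st.1 + 1 else st.1),
          left, i + 1))
      (ans, seen, p.length)) : Int × _).1 = refLoop r seen ans := by
  intro r
  induction r with
  | nil => intro p seen ans _; rfl
  | cons x t ih =>
    intro p seen ans hxs
    rw [List.foldl_cons]
    show ((t.foldl
      (fun (st : Int × PySem.Set Int × Nat) x =>
        let left := st.2.1.add x
        let i := st.2.2
        ((if (left.length : Int) = (suffixCounts xs).getD (i + 1) 0 then st.1 + 1 else st.1),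
          left, i + 1))
      ((if ((seen.add x).length : Int) = (suffixCounts xs).getD (p.length + 1) 0
             then ans + 1 else ans), seen.add x, p.length + 1)) : Int × _).1
      = refLoop (x :: t) seen ans
    have hget : (suffixCounts xs).getD (p.length + 1) 0
        = ((PySem.Set.ofList t).length : Int) := by
      have hle : p.length + 1 ≤ xs.length := by
        subst hxs; simp
      have h := (suffix_inv xs).2.2 (p.length + 1) hle
      rw [h]
      congr 2
      have : xs = (p ++ [x]) ++ t := by simp [hxs]
      rw [this]
      have hlen : p.length + 1 = (p ++ [x]).length := by simp
      rw [hlen, List.drop_left]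
    have hplen : p.length + 1 = (p ++ [x]).length := by simp
    rw [hget, hplen, ih (p ++ [x]) (seen.add x) _ (by simp [hxs])]
    show refLoop t (seen.add x) _ = refLoop (x :: t) seen ans
    rw [refLoop]
    congr 1
    by_cases hcond : (seen.add x).length = (PySem.Set.ofList t).length
    · rw [if_pos (by exact_mod_cast hcond), if_pos hcond]
    · rw [if_neg (by exact_mod_cast hcond), if_neg hcond]

-- ===== VERDICT (by name: the statement is the Claim_ definition above) =====
theorem solution_spec : Claim_equal_solution := by
  intro topping _
  have h1 : (PySem.Dict.empty : PySem.Dict Int Int).keys.Nodup := by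
    simp [PySem.Dict.keys_empty]
  have h2 : (PySem.Set.empty : PySem.Set Int).Nodup := List.nodup_nil
  have h3 : ∀ v : Int, (PySem.Dict.empty : PySem.Dict Int Int).contains v = true ↔
      v ∈ (PySem.Set.empty : PySem.Set Int) := by
    intro v; simp [PySem.Dict.contains_empty, PySem.Set.empty]
  have h4 : DicInv (PySem.Dict.counter topping) topping :=
    ⟨PySem.Dict.nodup_keys_counter _, fun v => PySem.Dict.getD_counter _ _,
      fun v hv => by
        have hc := (PySem.Dict.contains_counter topping v) ▸ hv
        have hm : v ∈ topping := by simpa using hc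
        have := List.count_pos_iff.mpr hm
        omega⟩
  have hA := A_loop topping 0 0 PySem.Dict.empty (PySem.Dict.counter topping)
    PySem.Set.empty h1 h2 h3 h4
  have hB := B_loop topping topping [] PySem.Set.empty 0 rfl
  unfold Spec_solution solution solution_alt
  exact hA.trans hB.symm
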